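-- pv_equiv track=rewrite | github.com/suywang/Vuldetexp | src/word_embedding.py | tokenize_code_line
-- ===== SOURCE A (Python) =====
-- def tokenize_code_line(line):
--     # Sets for operators
--     operators3 = {'<<=', '>>='}
--     operators2 = {
--         '->', '++', '--', '!~', '<<', '>>', '<=', '>=', '==', '!=', '&&', '||',
--         '+=', '-=', '*=', '/=', '%=', '&=', '^=', '|='
--     }
--     operators1 = {
--         '(', ')', '[', ']', '.', '+', '-', '*', '&', '/', '%', '<', '>', '^', '|',
--         '=', ',', '?', ':', ';', '{', '}', '!', '~'
--     }
--
--     tmp, w = [], []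
--     i = 0
--     if type(i) == None:
--         return []
--     while i < len(line):
--         # Ignore spaces and combine previously collected chars to form words
--         if line[i] == ' ':
--             tmp.append(''.join(w).strip())
--             tmp.append(line[i].strip())
--             w = []
--             i += 1
--         # Check operators and append to final list
--         elif line[i:i + 3] in operators3:
--             tmp.append(''.join(w).strip())
--             tmp.append(line[i:i + 3].strip())
--             w = []
--             i += 3
--         elif line[i:i + 2] in operators2:
--             tmp.append(''.join(w).strip())
--             tmp.append(line[i:i + 2].strip())
--             w = []
--             i += 2
--         elif line[i] in operators1:
--             tmp.append(''.join(w).strip())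
--             tmp.append(line[i].strip())
--             w = []
--             i += 1
--         # Character appended to word list
--         else:
--             w.append(line[i])
--             i += 1
--     if (len(w) != 0):
--         tmp.append(''.join(w).strip())
--         w = []
--     # Filter out irrelevant strings
--     tmp = list(filter(lambda c: (c != '' and c != ' '), tmp))
--     return tmp
-- ===== SOURCE B (Python) =====
-- def tokenize_code_line(line):
--     # Rewrite-then-split: surround every operator (longest first) with spaces,
--     # then split the rewritten string on spaces, strip each piece, drop empties.
--     operators3 = {'<<=', '>>='}
--     operators2 = {
--         '->', '++', '--', '!~', '<<', '>>', '<=', '>=', '==', '!=', '&&', '||',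
--         '+=', '-=', '*=', '/=', '%=', '&=', '^=', '|='
--     }
--     operators1 = {
--         '(', ')', '[', ']', '.', '+', '-', '*', '&', '/', '%', '<', '>', '^', '|',
--         '=', ',', '?', ':', ';', '{', '}', '!', '~'
--     }
--     out = []
--     i = 0
--     n = len(line)
--     while i < n:
--         if line[i:i + 3] in operators3:
--             out.append(' ' + line[i:i + 3] + ' ')
--             i += 3
--         elif line[i:i + 2] in operators2:
--             out.append(' ' + line[i:i + 2] + ' ')
--             i += 2
--         elif line[i] in operators1:
--             out.append(' ' + line[i] + ' ')
--             i += 1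
--         else:
--             out.append(line[i])
--             i += 1
--     return [t.strip() for t in ''.join(out).split(' ') if t.strip()]
-- ===== Notes on version B (the rewrite author's own statement) =====
-- stated objective: alternative
-- what changed: B replaces A's character-accumulator loop (word buffer flushed with empty placeholders into tmp, then a final filter) by a rewrite-then-split pipeline: one pass pads every operator (longest first) with spaces, then a single split on spaces with strip-and-drop-empty yields the tokens.
import Mathlib
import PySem

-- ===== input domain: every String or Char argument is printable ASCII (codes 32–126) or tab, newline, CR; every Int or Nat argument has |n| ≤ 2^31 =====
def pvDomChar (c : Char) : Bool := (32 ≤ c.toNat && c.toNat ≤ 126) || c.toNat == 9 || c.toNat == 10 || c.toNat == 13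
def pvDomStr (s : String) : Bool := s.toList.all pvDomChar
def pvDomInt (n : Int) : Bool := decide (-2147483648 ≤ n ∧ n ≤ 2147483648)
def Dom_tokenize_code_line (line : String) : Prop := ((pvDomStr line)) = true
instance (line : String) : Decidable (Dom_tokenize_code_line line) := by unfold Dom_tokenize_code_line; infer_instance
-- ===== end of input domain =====

-- B rewrites the line by padding every operator with spaces and then splits once on spaces (rewrite-then-split
-- instead of A's char-accumulator loop with a final filter); objective: simpler/alternative, same output.

-- operator tables shared by both ports (Python: the literal sets operators3/operators2/operators1)
def pvOps3 : List (List Char) := [['<','<','='], ['>','>','=']]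
def pvOps2 : List (List Char) :=
  [['-','>'],['+','+'],['-','-'],['!','~'],['<','<'],['>','>'],['<','='],['>','='],['=','='],['!','='],
   ['&','&'],['|','|'],['+','='],['-','='],['*','='],['/','='],['%','='],['&','='],['^','='],['|','=']]
def pvOps1 : List Char :=
  ['(',')','[',']','.','+','-','*','&','/','%','<','>','^','|','=',',','?',':',';','{','}','!','~']

-- ===== PORT A =====
-- A's while-loop: state (remaining chars, word buffer w, tmp); tokens kept as List Char, String.ofList at the end.
def tokenizeLoopA : List Char → List Char → List (List Char) → List (List Char)
  | [], w, tmp => if w.length ≠ 0 then tmp ++ [PySem.Chars.strip w] else tmp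
  | c :: rest, w, tmp =>
    if c = ' ' then
      tokenizeLoopA rest [] (tmp ++ [PySem.Chars.strip w, PySem.Chars.strip [c]])
    else if List.take 3 (c :: rest) ∈ pvOps3 then
      tokenizeLoopA (List.drop 3 (c :: rest)) []
        (tmp ++ [PySem.Chars.strip w, PySem.Chars.strip (List.take 3 (c :: rest))])
    else if List.take 2 (c :: rest) ∈ pvOps2 then
      tokenizeLoopA (List.drop 2 (c :: rest)) []
        (tmp ++ [PySem.Chars.strip w, PySem.Chars.strip (List.take 2 (c :: rest))])
    else if c ∈ pvOps1 then
      tokenizeLoopA rest [] (tmp ++ [PySem.Chars.strip w, PySem.Chars.strip [c]])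
    else
      tokenizeLoopA rest (w ++ [c]) tmp
  termination_by cs _ _ => cs.length
  decreasing_by all_goals (simp only [List.length_drop, List.length_cons]; omega)

-- the `if type(i) == None` guard in A is statically false (type(i) is int, never None) and is dropped
def tokenize_code_line (line : String) : List String :=
  ((tokenizeLoopA line.toList [] []).filter (fun c => decide (c ≠ [] ∧ c ≠ [' ']))).map String.ofList

-- ===== PORT B =====
-- Source B's first loop: pad each operator (longest first) with one space on each side, copy other chars.
def pvRewrite : List Char → List Char
  | [] => []
  | c :: rest =>
    if List.take 3 (c :: rest) ∈ pvOps3 then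
      ' ' :: (List.take 3 (c :: rest) ++ ' ' :: pvRewrite (List.drop 3 (c :: rest)))
    else if List.take 2 (c :: rest) ∈ pvOps2 then
      ' ' :: (List.take 2 (c :: rest) ++ ' ' :: pvRewrite (List.drop 2 (c :: rest)))
    else if c ∈ pvOps1 then
      ' ' :: c :: ' ' :: pvRewrite rest
    else c :: pvRewrite rest
  termination_by cs => cs.length
  decreasing_by all_goals (simp only [List.length_drop, List.length_cons]; omega)

-- Source B: [t.strip() for t in rewritten.split(' ') if t.strip()]
def tokenize_code_line_alt (line : String) : List String :=
  ((PySem.Chars.splitOn (pvRewrite line.toList) [' ']).filterMap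
    (fun t => let s := PySem.Chars.strip t; if s = [] then none else some s)).map String.ofList

-- ===== PRECONDITION & SPEC =====
def Spec_tokenize_code_line (line : String) (out : List String) : Prop := out = tokenize_code_line_alt line
instance (line : String) (out : List String) : Decidable (Spec_tokenize_code_line line out) := by unfold Spec_tokenize_code_line; infer_instance

-- ===== CLAIM (what is proved, stated in full; the proofs are below) =====
def Claim_equal_tokenize_code_line : Prop := ∀ (line : String), Dom_tokenize_code_line line → Spec_tokenize_code_line line (tokenize_code_line line)

-- ===== LEMMAS AND PROOFS =====

-- proof-side model of str.split(' ')
def pvSp : List Char → List (List Char)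
  | [] => [[]]
  | c :: r => if c = ' ' then [] :: pvSp r else (pvSp r).modifyHead (c :: ·)

-- tokens B extracts from a rewritten character list
def pvTokL (l : List Char) : List (List Char) :=
  (pvSp l).filterMap (fun t => let s := PySem.Chars.strip t; if s = [] then none else some s)

theorem pv_go_eq (fuel : Nat) : ∀ (l cur : List Char) (acc : List (List Char)),
    l.length ≤ fuel → PySem.Chars.splitOn.go [' '] fuel l cur acc =
      acc.reverse ++ (pvSp l).modifyHead (fun x => cur.reverse ++ x) := by
  induction fuel with
  | zero =>
    intro l cur acc h
    have : l = [] := by cases l <;> simp_all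
    subst this
    simp [PySem.Chars.splitOn.go, pvSp]
  | succ n ih =>
    intro l cur acc h
    cases l with
    | nil => simp [PySem.Chars.splitOn.go, pvSp]
    | cons c rest =>
      by_cases hc : c = ' '
      · subst hc
        rw [PySem.Chars.splitOn.go]
        simp only [List.isPrefixOf]
        rw [ih]
        · have hm : List.modifyHead (fun x : List Char => x) (pvSp rest) = pvSp rest := by
            cases pvSp rest <;> simp
          simp [pvSp, hm]
        · simp at h ⊢; omega
      · rw [PySem.Chars.splitOn.go]
        simp only [List.isPrefixOf]
        rw [if_neg, ih]
        · simp [pvSp, hc, List.modifyHead_modifyHead, Function.comp_def]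
        · simp at h ⊢; omega
        · simp [Ne.symm hc]

theorem pv_splitOn_eq (l : List Char) : PySem.Chars.splitOn l [' '] = pvSp l := by
  have hm : List.modifyHead (fun x : List Char => [] ++ x) (pvSp l) = pvSp l := by
    cases pvSp l <;> simp
  rw [PySem.Chars.splitOn, pv_go_eq (l.length + 1) l [] [] (by omega)]
  simpa using hm

theorem pv_rstrip_prefix (l : List Char) : PySem.Chars.rstrip l <+: l := by
  rw [PySem.Chars.rstrip, ← List.reverse_suffix]
  simpa using List.dropWhile_suffix _

theorem pv_strip_ne_space (l : List Char) : PySem.Chars.strip l ≠ [' '] := by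
  intro h
  rw [PySem.Chars.strip] at h
  have hp : [' '] <+: PySem.Chars.lstrip l := h ▸ pv_rstrip_prefix _
  obtain ⟨t, ht⟩ := hp
  rw [PySem.Chars.lstrip] at ht
  have h2 : List.dropWhile PySem.Chars.isspace l = ' ' :: t := by simpa using ht.symm
  have := List.head_dropWhile_not (p := PySem.Chars.isspace) (l := l) (by simp [h2])
  simp only [h2] at this
  simp [PySem.Chars.isspace] at this

theorem pvSp_append {w : List Char} (X : List Char) (hw : ' ' ∉ w) :
    pvSp (w ++ X) = (pvSp X).modifyHead (fun x => w ++ x) := by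
  induction w with
  | nil =>
    cases hX : pvSp X <;> simp [hX]
  | cons c w' ih =>
    simp at hw
    simp [pvSp, Ne.symm hw.1, ih hw.2, List.modifyHead_modifyHead, Function.comp_def]

theorem pvTokL_word {w : List Char} (hw : ' ' ∉ w) :
    pvTokL w = if PySem.Chars.strip w = [] then [] else [PySem.Chars.strip w] := by
  have : pvSp w = [w] := by
    have := pvSp_append (w := w) [] hw
    simpa [pvSp] using this
  by_cases h : PySem.Chars.strip w = [] <;> simp [pvTokL, this, h]

theorem pvTokL_cons_word {w : List Char} (X : List Char) (hw : ' ' ∉ w) :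
    pvTokL (w ++ ' ' :: X)
      = (if PySem.Chars.strip w = [] then [] else [PySem.Chars.strip w]) ++ pvTokL X := by
  have h1 : pvSp (w ++ ' ' :: X) = w :: pvSp X := by
    rw [pvSp_append _ hw]; simp [pvSp]
  by_cases h : PySem.Chars.strip w = [] <;> simp [pvTokL, h1, h]

theorem pvOps3_facts : ∀ t ∈ pvOps3, ' ' ∉ t ∧ PySem.Chars.strip t = t ∧ t ≠ [] := by
  intro t ht; fin_cases ht <;> exact ⟨by decide, by decide, by decide⟩

theorem pvOps2_facts : ∀ t ∈ pvOps2, ' ' ∉ t ∧ PySem.Chars.strip t = t ∧ t ≠ [] := by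
  intro t ht; fin_cases ht <;> exact ⟨by decide, by decide, by decide⟩

theorem pvOps1_facts : ∀ c ∈ pvOps1, c ≠ ' ' ∧ PySem.Chars.strip [c] = [c] := by
  intro c hc; fin_cases hc <;> exact ⟨by decide, by decide⟩

theorem pvRewrite_space (rest : List Char) : pvRewrite (' ' :: rest) = ' ' :: pvRewrite rest := by
  rw [pvRewrite, if_neg, if_neg, if_neg]
  · simp [pvOps1]
  · intro h; exact (pvOps2_facts _ h).1 (by simp)
  · intro h; exact (pvOps3_facts _ h).1 (by simp)

-- the final filter on a single stripped word
theorem pvF_strip (w : List Char) :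
    List.filter (fun c => decide (c ≠ [] ∧ c ≠ [' '])) [PySem.Chars.strip w]
      = if PySem.Chars.strip w = [] then [] else [PySem.Chars.strip w] := by
  by_cases h : PySem.Chars.strip w = [] <;> simp [List.filter, h, pv_strip_ne_space w]

-- the final filter keeps an operator token
theorem pvF_op (t : List Char) (ht : ' ' ∉ t) (hne : t ≠ []) :
    List.filter (fun c => decide (c ≠ [] ∧ c ≠ [' '])) [t] = [t] := by
  have : t ≠ [' '] := by intro h; subst h; simp at ht
  simp [List.filter, hne, this]



theorem pv_main (cs w : List Char) (tmp : List (List Char)) : ' ' ∉ w →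
    (tokenizeLoopA cs w tmp).filter (fun c => decide (c ≠ [] ∧ c ≠ [' ']))
      = tmp.filter (fun c => decide (c ≠ [] ∧ c ≠ [' '])) ++ pvTokL (w ++ pvRewrite cs) := by
  fun_induction tokenizeLoopA cs w tmp with
  | case1 w tmp hlen =>
    intro hw
    have hr : pvRewrite [] = [] := by simp [pvRewrite]
    rw [List.filter_append, pvF_strip, hr, List.append_nil, pvTokL_word hw]
  | case2 w tmp hlen =>
    intro hw
    have hwn : w = [] := by simpa using hlen
    subst hwn
    have hr : pvRewrite [] = [] := by simp [pvRewrite]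
    simp [hr, pvTokL, pvSp, PySem.Chars.strip, PySem.Chars.lstrip, PySem.Chars.rstrip]
  | case3 rest w tmp ih =>
    intro hw
    have hsp' : PySem.Chars.strip [' '] = [] := by decide
    rw [ih (by simp), List.filter_append, pvRewrite_space, pvTokL_cons_word _ hw, hsp']
    have hf : List.filter (fun c => decide (c ≠ [] ∧ c ≠ [' ']))
        ([PySem.Chars.strip w, []] : List (List Char))
        = if PySem.Chars.strip w = [] then [] else [PySem.Chars.strip w] := by
      rw [show ([PySem.Chars.strip w, []] : List (List Char))
          = [PySem.Chars.strip w] ++ [[]] from rfl, List.filter_append, pvF_strip]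
      simp [List.filter]
    rw [hf]
    simp [List.append_assoc]
  | case4 c rest w tmp hc h3 ih =>
    intro hw
    obtain ⟨hsp, hst, hne⟩ := pvOps3_facts _ h3
    have hrw : pvRewrite (c :: rest)
        = ' ' :: (List.take 3 (c :: rest) ++ ' ' :: pvRewrite (List.drop 3 (c :: rest))) := by
      rw [pvRewrite]; rw [if_pos h3]
    rw [ih (by simp), List.filter_append, hrw, pvTokL_cons_word _ hw, pvTokL_cons_word _ hsp]
    have hf : List.filter (fun x => decide (x ≠ [] ∧ x ≠ [' ']))
        [PySem.Chars.strip w, PySem.Chars.strip (List.take 3 (c :: rest))]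
        = (if PySem.Chars.strip w = [] then [] else [PySem.Chars.strip w])
          ++ [List.take 3 (c :: rest)] := by
      rw [show [PySem.Chars.strip w, PySem.Chars.strip (List.take 3 (c :: rest))]
          = [PySem.Chars.strip w] ++ [PySem.Chars.strip (List.take 3 (c :: rest))] from rfl,
        List.filter_append, pvF_strip, hst, pvF_op _ hsp hne]
    rw [hf, hst]
    simp [List.append_assoc]
  | case5 c rest w tmp hc h3 h2 ih =>
    intro hw
    obtain ⟨hsp, hst, hne⟩ := pvOps2_facts _ h2
    have hrw : pvRewrite (c :: rest)
        = ' ' :: (List.take 2 (c :: rest) ++ ' ' :: pvRewrite (List.drop 2 (c :: rest))) := by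
      rw [pvRewrite]; rw [if_neg h3, if_pos h2]
    rw [ih (by simp), List.filter_append, hrw, pvTokL_cons_word _ hw, pvTokL_cons_word _ hsp]
    have hf : List.filter (fun x => decide (x ≠ [] ∧ x ≠ [' ']))
        [PySem.Chars.strip w, PySem.Chars.strip (List.take 2 (c :: rest))]
        = (if PySem.Chars.strip w = [] then [] else [PySem.Chars.strip w])
          ++ [List.take 2 (c :: rest)] := by
      rw [show [PySem.Chars.strip w, PySem.Chars.strip (List.take 2 (c :: rest))]
          = [PySem.Chars.strip w] ++ [PySem.Chars.strip (List.take 2 (c :: rest))] from rfl,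
        List.filter_append, pvF_strip, hst, pvF_op _ hsp hne]
    rw [hf, hst]
    simp [List.append_assoc]
  | case6 c rest w tmp hc h3 h2 h1 ih =>
    intro hw
    obtain ⟨hcs, hst⟩ := pvOps1_facts _ h1
    have hsp : ' ' ∉ [c] := by simp [Ne.symm hcs]
    have hrw : pvRewrite (c :: rest) = ' ' :: ([c] ++ ' ' :: pvRewrite rest) := by
      rw [pvRewrite]; rw [if_neg h3, if_neg h2, if_pos h1]; rfl
    rw [ih (by simp), List.filter_append, hrw, pvTokL_cons_word _ hw, pvTokL_cons_word _ hsp]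
    have hf : List.filter (fun x => decide (x ≠ [] ∧ x ≠ [' ']))
        [PySem.Chars.strip w, PySem.Chars.strip [c]]
        = (if PySem.Chars.strip w = [] then [] else [PySem.Chars.strip w]) ++ [[c]] := by
      rw [show [PySem.Chars.strip w, PySem.Chars.strip [c]]
          = [PySem.Chars.strip w] ++ [PySem.Chars.strip [c]] from rfl,
        List.filter_append, pvF_strip, hst, pvF_op _ hsp (by simp)]
    rw [hf, hst]
    simp [List.append_assoc]
  | case7 c rest w tmp hc h3 h2 h1 ih =>
    intro hw
    have hw' : ' ' ∉ w ++ [c] := by simp [hw, Ne.symm hc]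
    have hrw : pvRewrite (c :: rest) = c :: pvRewrite rest := by
      rw [pvRewrite]; rw [if_neg h3, if_neg h2, if_neg h1]
    rw [ih hw', hrw]
    simp [List.append_assoc]

-- ===== VERDICT (by name: the statement is the Claim_ definition above) =====
theorem tokenize_code_line_spec : Claim_equal_tokenize_code_line := by
  intro line _
  unfold Spec_tokenize_code_line tokenize_code_line tokenize_code_line_alt
  rw [pv_splitOn_eq, pv_main line.toList [] [] (by simp)]
  simp [pvTokL]
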